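-- pv_equiv track=rewrite | github.com/gsangf10/Programers_python | Lv2_15_[3차] 파일명 정렬.py | is_str_big
-- ===== SOURCE A (Python) =====
-- def is_str_big(str1, str2):
--   b_alpha = [chr(i) for i in range(65,91)]
--   str1_len = len(str1)
--   str2_len = len(str2)
--   for q in range(str1_len):
--     if q == str2_len:
--       return True
--     # 공백 체크
--     if str1[q] == ' ' and str2[q] == ' ':
--       continue
--     elif str1[q] == ' ' and str2[q] != ' ':
--       return False
--     elif str1[q] != ' ' and str2[q] == ' ':
--       return True
--     # 특수문자 비교
--     if str1[q] not in b_alpha and str2[q] not in b_alpha: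
--       if ord(str1[q]) < ord(str2[q]):
--         return False
--       elif ord(str1[q]) > ord(str2[q]):
--         return True
--       else:
--         continue
--     elif str1[q] in b_alpha and str2[q] not in b_alpha:
--       return False
--     elif str1[q] not in b_alpha and str2[q] in b_alpha:
--       return True
--     # 문자 비교
--     if ord(str1[q]) < ord(str2[q]):
--       return False
--     elif ord(str1[q]) > ord(str2[q]):
--       return True
--   return False
-- ===== SOURCE B (Python) =====
-- def is_str_big(str1, str2):
--   def key(c):
--     if c == ' ':
--       return (0, ord(c))
--     if 'A' <= c <= 'Z':
--       return (1, ord(c))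
--     return (2, ord(c))
--   return [key(c) for c in str1] > [key(c) for c in str2]
-- ===== Notes on version B (the rewrite author's own statement) =====
-- stated objective: simpler
-- what changed: Replaced the 10-branch character-by-character cascade (explicit space/uppercase/special tiers with early returns) by a per-character key (class, ord) — class 0 for space, 1 for uppercase, 2 otherwise — and one native lexicographic comparison of the two key lists.
import Mathlib
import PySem

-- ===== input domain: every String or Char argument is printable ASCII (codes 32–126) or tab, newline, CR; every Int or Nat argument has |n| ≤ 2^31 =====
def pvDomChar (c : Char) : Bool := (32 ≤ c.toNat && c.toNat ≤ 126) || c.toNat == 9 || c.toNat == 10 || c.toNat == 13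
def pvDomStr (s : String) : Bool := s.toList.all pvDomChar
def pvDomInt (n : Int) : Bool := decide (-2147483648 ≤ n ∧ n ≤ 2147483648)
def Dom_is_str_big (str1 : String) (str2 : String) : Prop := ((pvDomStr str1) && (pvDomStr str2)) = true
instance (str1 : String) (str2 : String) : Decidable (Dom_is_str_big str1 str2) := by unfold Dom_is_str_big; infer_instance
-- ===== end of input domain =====

-- B replaces A's 10-branch per-character cascade by a (class, ord) key per character
-- and one lexicographic comparison of the two key lists (objective: simpler).

-- ===== PORT A =====
-- b_alpha = [chr(i) for i in range(65,91)]
def pvBAlpha : List Char := (PySem.List.pyRange 65 91 1).map (fun i => Char.ofNat i.toNat)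

-- the 'for q in range(str1_len)' loop: str1[q]/str2[q] are consumed strictly in order, so the
-- loop is transcribed as simultaneous recursion on the two character lists; branches in A's order.
def pvALoop : List Char → List Char → Bool
  | [], _ => false                       -- loop finished without returning
  | _ :: _, [] => true                   -- q == str2_len
  | c1 :: t1, c2 :: t2 =>
    if c1 = ' ' ∧ c2 = ' ' then pvALoop t1 t2
    else if c1 = ' ' ∧ c2 ≠ ' ' then false
    else if c1 ≠ ' ' ∧ c2 = ' ' then true
    else if ¬ pvBAlpha.contains c1 ∧ ¬ pvBAlpha.contains c2 then
      (if c1.toNat < c2.toNat then false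
       else if c1.toNat > c2.toNat then true
       else pvALoop t1 t2)
    else if pvBAlpha.contains c1 ∧ ¬ pvBAlpha.contains c2 then false
    else if ¬ pvBAlpha.contains c1 ∧ pvBAlpha.contains c2 then true
    else if c1.toNat < c2.toNat then false
    else if c1.toNat > c2.toNat then true
    else pvALoop t1 t2

def is_str_big (str1 : String) (str2 : String) : Bool :=
  pvALoop str1.toList str2.toList

-- ===== PORT B =====
def pvKey (c : Char) : Nat × Nat :=
  if c = ' ' then (0, c.toNat)
  else if 'A' ≤ c ∧ c ≤ 'Z' then (1, c.toNat)
  else (2, c.toNat)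

-- Python's '>' on lists: first unequal element decides; a strict prefix is smaller.
def pvLexGt : List (Nat × Nat) → List (Nat × Nat) → Bool
  | [], _ => false
  | _ :: _, [] => true
  | x :: xs, y :: ys =>
    if x = y then pvLexGt xs ys
    else decide (y.1 < x.1 ∨ (x.1 = y.1 ∧ y.2 < x.2))

def is_str_big_alt (str1 : String) (str2 : String) : Bool :=
  pvLexGt (str1.toList.map pvKey) (str2.toList.map pvKey)

-- ===== PRECONDITION & SPEC =====
def Spec_is_str_big (str1 : String) (str2 : String) (out : Bool) : Prop := out = is_str_big_alt str1 str2
instance (str1 : String) (str2 : String) (out : Bool) : Decidable (Spec_is_str_big str1 str2 out) := by unfold Spec_is_str_big; infer_instance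

-- ===== CLAIM (what is proved, stated in full; the proofs are below) =====
def Claim_equal_is_str_big : Prop := ∀ (str1 : String) (str2 : String), Dom_is_str_big str1 str2 → Spec_is_str_big str1 str2 (is_str_big str1 str2)

-- ===== LEMMAS AND PROOFS =====

theorem char_toNat_inj (c d : Char) (h : c.toNat = d.toNat) : c = d := by
  apply Char.ext; apply UInt32.toNat_inj.mp; exact h

theorem pvBAlpha_contains (c : Char) :
    pvBAlpha.contains c = decide (65 ≤ c.toNat ∧ c.toNat ≤ 90) := by
  have e : pvBAlpha = ['A','B','C','D','E','F','G','H','I','J','K','L','M','N','O','P','Q','R','S','T','U','V','W','X','Y','Z'] := by decide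
  have hiff : ∀ d : Char, c = d ↔ c.toNat = d.toNat := fun d => ⟨fun h => h ▸ rfl, char_toNat_inj c d⟩
  rw [e, List.contains_eq_mem, decide_eq_decide]
  simp only [List.mem_cons, List.not_mem_nil, or_false, hiff,
    show ('A':Char).toNat = 65 from rfl, show ('B':Char).toNat = 66 from rfl, show ('C':Char).toNat = 67 from rfl, show ('D':Char).toNat = 68 from rfl, show ('E':Char).toNat = 69 from rfl, show ('F':Char).toNat = 70 from rfl, show ('G':Char).toNat = 71 from rfl, show ('H':Char).toNat = 72 from rfl, show ('I':Char).toNat = 73 from rfl, show ('J':Char).toNat = 74 from rfl, show ('K':Char).toNat = 75 from rfl, show ('L':Char).toNat = 76 from rfl, show ('M':Char).toNat = 77 from rfl, show ('N':Char).toNat = 78 from rfl, show ('O':Char).toNat = 79 from rfl, show ('P':Char).toNat = 80 from rfl, show ('Q':Char).toNat = 81 from rfl, show ('R':Char).toNat = 82 from rfl, show ('S':Char).toNat = 83 from rfl, show ('T':Char).toNat = 84 from rfl, show ('U':Char).toNat = 85 from rfl, show ('V':Char).toNat = 86 from rfl, show ('W':Char).toNat = 87 from rfl, show ('X':Char).toNat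 = 88 from rfl, show ('Y':Char).toNat = 89 from rfl, show ('Z':Char).toNat = 90 from rfl]
  omega

theorem pvKey_def (c : Char) :
    pvKey c = (if c.toNat = 32 then 0 else if 65 ≤ c.toNat ∧ c.toNat ≤ 90 then 1 else 2, c.toNat) := by
  unfold pvKey
  have h1 : (c = ' ') ↔ c.toNat = 32 := ⟨fun h => h ▸ rfl, fun h => char_toNat_inj _ _ h⟩
  have h2 : ('A' ≤ c ∧ c ≤ 'Z') ↔ (65 ≤ c.toNat ∧ c.toNat ≤ 90) := by
    simp [Char.le_def, UInt32.le_iff_toNat_le]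
  simp only [h1, h2]
  split_ifs <;> rfl

theorem pvALoop_step (c1 c2 : Char) (t1 t2 : List Char) :
    pvALoop (c1 :: t1) (c2 :: t2) =
      if pvKey c1 = pvKey c2 then pvALoop t1 t2
      else decide ((pvKey c2).1 < (pvKey c1).1 ∨ ((pvKey c1).1 = (pvKey c2).1 ∧ (pvKey c2).2 < (pvKey c1).2)) := by
  have h1 : ∀ c : Char, (c = ' ') ↔ c.toNat = 32 := fun c => ⟨fun h => h ▸ rfl, fun h => char_toNat_inj _ _ h⟩
  have hcc : (c1 = c2) ↔ c1.toNat = c2.toNat := ⟨fun h => h ▸ rfl, fun h => char_toNat_inj _ _ h⟩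
  simp only [pvALoop, pvKey_def, pvBAlpha_contains, h1, Prod.mk.injEq,
    decide_eq_true_eq, ne_eq]
  split_ifs <;> simp_all <;> omega

theorem pvALoop_eq (l1 l2 : List Char) :
    pvALoop l1 l2 = pvLexGt (l1.map pvKey) (l2.map pvKey) := by
  induction l1 generalizing l2 with
  | nil => cases l2 <;> rfl
  | cons c1 t1 ih =>
    cases l2 with
    | nil => rfl
    | cons c2 t2 =>
      rw [List.map_cons, List.map_cons, pvALoop_step, pvLexGt, ih]

-- ===== VERDICT (by name: the statement is the Claim_ definition above) =====
theorem is_str_big_spec : Claim_equal_is_str_big := by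
  intro s1 s2 _
  unfold Spec_is_str_big is_str_big is_str_big_alt
  exact pvALoop_eq _ _
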